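-- pv_equiv track=rewrite | github.com/longevitycoach/StrunzKnowledge | src/mcp/streamable_http_server.py | _validate_origin
-- ===== SOURCE A (Python) =====
-- def _validate_origin(origin: str) -> bool:
--     """Validate Origin header to prevent DNS rebinding attacks"""
--     allowed_origins = [
--         "https://claude.ai",
--         "https://*.claude.ai",
--         "http://localhost",
--         "http://localhost:*",
--         "http://127.0.0.1",
--         "http://127.0.0.1:*"
--     ]
--
--     # Check exact matches and patterns
--     for allowed in allowed_origins:
--         if allowed.endswith("*"):
--             if origin.startswith(allowed[:-1]):
--                 return True
--         elif origin == allowed: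
--             return True
--
--     return False
-- ===== SOURCE B (Python) =====
-- _EXACT = {
--     "https://claude.ai",
--     "https://*.claude.ai",   # literal entry: the pattern does not end with '*'
--     "http://localhost",
--     "http://127.0.0.1",
-- }
-- _PREFIXES = ("http://localhost:", "http://127.0.0.1:")
--
-- def _validate_origin(origin: str) -> bool:
--     """Validate Origin header to prevent DNS rebinding attacks"""
--     return origin in _EXACT or any(origin.startswith(p) for p in _PREFIXES)
-- ===== Notes on version B (the rewrite author's own statement) =====
-- stated objective: simpler
-- what changed: Replaces the single branching scan over six mixed patterns (per-pattern wildcard-suffix test, slicing, startswith/equality) with two precomputed specialized containers: a set of four exact origins checked by one hash membership, then a tuple of two prefixes checked by any(startswith).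
import Mathlib
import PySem

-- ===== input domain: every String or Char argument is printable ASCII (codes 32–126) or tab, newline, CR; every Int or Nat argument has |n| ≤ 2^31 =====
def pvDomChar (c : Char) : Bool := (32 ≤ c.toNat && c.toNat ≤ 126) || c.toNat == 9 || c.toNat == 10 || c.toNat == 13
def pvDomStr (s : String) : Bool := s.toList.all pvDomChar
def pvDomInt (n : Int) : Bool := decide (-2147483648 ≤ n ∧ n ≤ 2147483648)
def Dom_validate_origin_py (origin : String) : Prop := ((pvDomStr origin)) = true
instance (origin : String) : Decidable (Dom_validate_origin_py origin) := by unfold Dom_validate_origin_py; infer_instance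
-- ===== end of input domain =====

-- B replaces A's single branching scan over six mixed patterns with two precomputed
-- specialized containers (an exact-match set and a prefix list), checked in two simple passes.

-- ===== PORT A =====
-- Literal port of A: scan the six patterns in order; '*'-ending patterns match by
-- prefix (after dropping the '*'), others by equality.
def allowedOrigins : List String :=
  ["https://claude.ai", "https://*.claude.ai", "http://localhost",
   "http://localhost:*", "http://127.0.0.1", "http://127.0.0.1:*"]

def validateLoop (origin : String) : List String → Bool
  | [] => false
  | allowed :: rest =>
    if PySem.Str.endswith allowed "*" then
      if PySem.Str.startswith origin (PySem.Str.slice allowed none (some (-1))) then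
        true
      else validateLoop origin rest
    else if origin == allowed then true
    else validateLoop origin rest

def validate_origin_py (origin : String) : Bool :=
  validateLoop origin allowedOrigins

-- ===== PORT B =====
-- Port of B: exact-match set (PySem.Set) plus a separate prefix pass.
def exactOrigins : PySem.Set String :=
  PySem.Set.ofList ["https://claude.ai", "https://*.claude.ai",
                    "http://localhost", "http://127.0.0.1"]

def prefixOrigins : List String := ["http://localhost:", "http://127.0.0.1:"]

def validate_origin_py_alt (origin : String) : Bool :=
  PySem.Set.contains exactOrigins origin
    || prefixOrigins.any (fun p => PySem.Str.startswith origin p)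

-- ===== PRECONDITION & SPEC =====
def Spec_validate_origin_py (origin : String) (out : Bool) : Prop := out = validate_origin_py_alt origin
instance (origin : String) (out : Bool) : Decidable (Spec_validate_origin_py origin out) := by unfold Spec_validate_origin_py; infer_instance

-- ===== CLAIM (what is proved, stated in full; the proofs are below) =====
def Claim_equal_validate_origin_py : Prop := ∀ (origin : String), Dom_validate_origin_py origin → Spec_validate_origin_py origin (validate_origin_py origin)

-- ===== LEMMAS AND PROOFS =====

-- ===== VERDICT (by name: the statement is the Claim_ definition above) =====
theorem validate_origin_py_spec : Claim_equal_validate_origin_py := by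
  intro origin _
  unfold Spec_validate_origin_py validate_origin_py validate_origin_py_alt
  have e1 : PySem.Str.endswith "https://claude.ai" "*" = false := by decide
  have e2 : PySem.Str.endswith "https://*.claude.ai" "*" = false := by decide
  have e3 : PySem.Str.endswith "http://localhost" "*" = false := by decide
  have e4 : PySem.Str.endswith "http://localhost:*" "*" = true := by decide
  have e5 : PySem.Str.endswith "http://127.0.0.1" "*" = false := by decide
  have e6 : PySem.Str.endswith "http://127.0.0.1:*" "*" = true := by decide
  have s4 : PySem.Str.slice "http://localhost:*" none (some (-1))
      = "http://localhost:" := by decide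
  have s6 : PySem.Str.slice "http://127.0.0.1:*" none (some (-1))
      = "http://127.0.0.1:" := by decide
  simp only [validateLoop, allowedOrigins, e1, e2, e3, e4, e5, e6, s4, s6,
    exactOrigins, prefixOrigins, PySem.Set.ofList, PySem.Set.contains, PySem.Set.add,
    List.any, Bool.false_eq_true, if_false, if_true, List.foldl, List.contains,
    Bool.or_false]
  by_cases h1 : origin = "https://claude.ai" <;>
    by_cases h2 : origin = "https://*.claude.ai" <;>
      by_cases h3 : origin = "http://localhost" <;>
        by_cases h5 : origin = "http://127.0.0.1" <;>
          simp [h1, h2, h3, h5]
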